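-- pv_equiv track=rewrite | github.com/ColdMacaroni/pig-latin | separate_nonalpha.py | separate_nonalpha
-- ===== SOURCE A (Python) =====
-- def separate_nonalpha(string):
--     """
--     Splits a sentence by words and nonalpha characters.
--     Spaces included
--     """
--     temp = ''
--     # This way instead of split so that spaces are conserved
--     # To avoid ["hi", ",", "you"] -> " ".join() -> "hi , you"
--     # Users can ["hi", ",", " ", "you"] -> ''.join() -> "hi, you"
--     sentence = list(string)
--     processed_sentence = []
--
--     for char in sentence:
--         if char.isalpha():
--             # Store up
--             temp += char
--         else:
--             processed_sentence.append(temp)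
--             processed_sentence.append(char)
--             temp = ''  # Reset
--     else:
--         # Just in case the last word doesnt get added by the previous
--         # else
--         processed_sentence.append(temp)
--
--     # Filter will clear out any empty strings
--     return list(filter(None, processed_sentence))
-- ===== SOURCE B (Python) =====
-- def separate_nonalpha(string):
--     """
--     Splits a sentence by words and nonalpha characters.
--     Spaces included
--     """
--     out = []
--     i = 0
--     n = len(string)
--     while i < n:
--         if string[i].isalpha():
--             j = i + 1
--             while j < n and string[j].isalpha():
--                 j += 1
--             out.append(string[i:j])
--             i = j
--         else:
--             out.append(string[i])
--             i += 1
--     return out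
-- ===== Notes on version B (the rewrite author's own statement) =====
-- stated objective: alternative
-- what changed: Replaces the char-by-char accumulator loop with empty-string filtering by an index scan that slices out each maximal alphabetic run directly, so no temp buffer and no filter pass are needed.
import Mathlib
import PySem

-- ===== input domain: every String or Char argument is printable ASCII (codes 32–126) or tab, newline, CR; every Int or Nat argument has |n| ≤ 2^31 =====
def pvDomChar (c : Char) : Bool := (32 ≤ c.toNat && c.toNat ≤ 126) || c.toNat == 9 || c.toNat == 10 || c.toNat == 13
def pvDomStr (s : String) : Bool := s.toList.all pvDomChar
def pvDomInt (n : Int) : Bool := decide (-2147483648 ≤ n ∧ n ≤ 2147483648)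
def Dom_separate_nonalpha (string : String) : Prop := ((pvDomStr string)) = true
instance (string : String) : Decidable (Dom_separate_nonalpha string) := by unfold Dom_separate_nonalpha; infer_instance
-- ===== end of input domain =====

-- B replaces A's accumulator-and-filter loop by an index scan emitting each maximal alphabetic run as one slice (alternative decomposition, same cost).

-- ===== PORT A =====
-- one step of A's for-loop: state = (temp as chars, processed_sentence as char-lists)
def sepAStep (st : List Char × List (List Char)) (c : Char) : List Char × List (List Char) :=
  if PySem.Chars.isalpha c then (st.1 ++ [c], st.2)
  else ([], st.2 ++ [st.1, [c]])

def separate_nonalpha (string : String) : List String :=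
  let r := string.toList.foldl sepAStep ([], [])
  (((r.2 ++ [r.1]).filter (fun t => !t.isEmpty)).map String.ofList)

-- ===== PORT B =====
-- B's outer while-loop: at an alpha char take the whole maximal alpha run (B's inner
-- while computing j; the slice string[i:j] is exactly that run), else emit the char alone.
def sepBGo : List Char → List String
  | [] => []
  | c :: rest =>
    if PySem.Chars.isalpha c then
      String.ofList ((c :: rest).takeWhile PySem.Chars.isalpha)
        :: sepBGo ((c :: rest).dropWhile PySem.Chars.isalpha)
    else
      String.ofList [c] :: sepBGo rest
  termination_by cs => cs.length
  decreasing_by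
    · rename_i h
      simp only [List.dropWhile_cons_of_pos h]
      exact Nat.lt_succ_of_le (List.length_dropWhile_le _ _)
    · simp

def separate_nonalpha_alt (string : String) : List String := sepBGo string.toList

-- ===== PRECONDITION & SPEC =====
def Spec_separate_nonalpha (string : String) (out : List String) : Prop := out = separate_nonalpha_alt string
instance (string : String) (out : List String) : Decidable (Spec_separate_nonalpha string out) := by unfold Spec_separate_nonalpha; infer_instance

-- ===== CLAIM (what is proved, stated in full; the proofs are below) =====
def Claim_equal_separate_nonalpha : Prop := ∀ (string : String), Dom_separate_nonalpha string → Spec_separate_nonalpha string (separate_nonalpha string)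

-- ===== LEMMAS AND PROOFS =====

-- what A's pending buffer t followed by the rest of the input eventually contributes
def flushT : List Char → List Char → List String
  | t, [] => if t = [] then [] else [String.ofList t]
  | t, c :: cs =>
    if PySem.Chars.isalpha c then flushT (t ++ [c]) cs
    else (if t = [] then [] else [String.ofList t]) ++ String.ofList [c] :: flushT [] cs

theorem flushT_eq_sepBGo : ∀ (cs t : List Char),
    flushT t cs = if t = [] then sepBGo cs
      else String.ofList (t ++ cs.takeWhile PySem.Chars.isalpha)
            :: sepBGo (cs.dropWhile PySem.Chars.isalpha) := by
  intro cs
  induction cs with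
  | nil => intro t; by_cases h : t = [] <;> simp [flushT, sepBGo, h]
  | cons c rest ih =>
    intro t
    by_cases hc : PySem.Chars.isalpha c = true
    · rw [flushT, if_pos hc, ih (t ++ [c])]
      simp only [List.append_ne_nil_of_right_ne_nil t (by simp : ([c] : List Char) ≠ []),
        List.takeWhile_cons_of_pos hc, List.dropWhile_cons_of_pos hc]
      by_cases h : t = []
      · subst h; rw [if_pos rfl, sepBGo, if_pos hc]
        simp [List.takeWhile_cons_of_pos hc, List.dropWhile_cons_of_pos hc]
      · rw [if_neg h]; simp
    · rw [flushT, if_neg hc, ih []]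
      by_cases h : t = []
      · subst h; rw [if_pos rfl, sepBGo, if_neg hc]; simp
      · rw [if_neg h, if_neg h, List.takeWhile_cons_of_neg (by simp [hc]),
          List.dropWhile_cons_of_neg (by simp [hc])]
        simp [sepBGo, hc]

theorem foldA_flush : ∀ (cs t : List Char) (acc : List (List Char)),
    (let r := cs.foldl sepAStep (t, acc)
     ((r.2 ++ [r.1]).filter (fun x => !x.isEmpty)).map String.ofList)
    = (acc.filter (fun x => !x.isEmpty)).map String.ofList ++ flushT t cs := by
  intro cs
  induction cs with
  | nil =>
    intro t acc
    by_cases h : t = [] <;> simp [flushT, h, List.filter_append]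
  | cons c rest ih =>
    intro t acc
    by_cases hc : PySem.Chars.isalpha c = true
    · simp only [List.foldl_cons, sepAStep, if_pos hc] at *
      rw [ih (t ++ [c]) acc, flushT, if_pos hc]
    · simp only [List.foldl_cons, sepAStep, if_neg hc] at *
      rw [ih [] (acc ++ [t, [c]]), flushT, if_neg hc]
      by_cases h : t = [] <;>
        simp [h, List.filter_append, List.append_assoc]

-- ===== VERDICT (by name: the statement is the Claim_ definition above) =====
theorem separate_nonalpha_spec : Claim_equal_separate_nonalpha := by
  intro s _
  show separate_nonalpha s = separate_nonalpha_alt s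
  unfold separate_nonalpha separate_nonalpha_alt
  rw [foldA_flush s.toList [] [], flushT_eq_sepBGo, if_pos rfl]
  simp
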